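-- pv_equiv track=rewrite | github.com/Fondamenti18/fondamenti-di-programmazione | students/1794546/homework04/program01.py | elimina
-- ===== SOURCE A (Python) =====
-- def crea(diz, x, diz1):
--     if x not in diz:
--         return []
--     if x in diz:
--         diz1[x]=diz[x]
--         y=diz1[x]
--         if y!=[]:
--             for el in y:
--                 crea(diz, el, diz1)
--     return diz1
--
-- def elimina(diz, x):
--     if x not in diz:
--         return diz
--     if x in diz:
--         diz1={}
--         B=crea(diz, x, diz1)
--         C = {k:v for k,v in diz.items() if k not in B}
--         return C
-- ===== SOURCE B (Python) =====
-- def elimina(diz, x):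
--     if x not in diz:
--         return diz
--     reached, stack = set(), [x]
--     while stack:
--         n = stack.pop()
--         if n in reached or n not in diz:
--             continue
--         reached.add(n)
--         stack.extend(diz[n])
--     return {k: v for k, v in diz.items() if k not in reached}
-- ===== Notes on version B (the rewrite author's own statement) =====
-- stated objective: alternative
-- what changed: Replaced the recursive crea (call-stack DFS that re-explores a node's subtree on every path to it and mutates a dict passed by reference) by an iterative explicit-stack traversal with a visited set, expanding every key at most once; the result is the same filter of diz by the reachable set.
-- crash fix: On inputs where some key reachable from x lies on a directed cycle, A's unbounded recursion raises RecursionError; B's visited-set traversal terminates and returns diz filtered by the reachable set. — e.g. on elimina([("a", ["a"])], "a"): A raises RecursionError, B returns []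
import Mathlib
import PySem

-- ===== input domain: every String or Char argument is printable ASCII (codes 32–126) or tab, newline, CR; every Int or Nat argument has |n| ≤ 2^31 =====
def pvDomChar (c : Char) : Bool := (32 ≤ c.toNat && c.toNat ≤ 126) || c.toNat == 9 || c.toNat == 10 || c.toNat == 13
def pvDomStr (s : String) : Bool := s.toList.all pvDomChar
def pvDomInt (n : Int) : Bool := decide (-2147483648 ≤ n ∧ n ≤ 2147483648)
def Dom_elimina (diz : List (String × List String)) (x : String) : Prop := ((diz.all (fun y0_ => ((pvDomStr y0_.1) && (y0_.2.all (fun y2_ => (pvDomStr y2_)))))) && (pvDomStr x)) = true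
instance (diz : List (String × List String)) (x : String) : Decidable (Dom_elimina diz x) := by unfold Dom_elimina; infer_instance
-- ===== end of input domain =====

-- B replaces A's recursive subtree copy (which re-explores a node on every path to it) by an
-- iterative explicit-stack traversal with a visited set; same return value on all of Pre_.

-- ===== PORT A =====
-- Literal port of A's recursive `crea`; the in-place mutation of diz1 is modelled by threading the
-- dict through the calls.  Python's `return []` / `return diz1` values are only consumed via
-- `k not in B` at the single call site where x IS a key, so the port returns the threaded dict in
-- both branches (exact there).  `fuel` is a termination guard only (the depth of Python's
-- recursion); Pre_elimina admits exactly the inputs where Python's recursion terminates, and there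
-- a depth of diz.length + 1 is never exhausted (shortest paths are simple).
def crea (diz : List (String × List String)) : Nat → String → PySem.Dict String (List String) → PySem.Dict String (List String)
  | 0, _, diz1 => diz1
  | fuel+1, x, diz1 =>
    match PySem.Dict.get? (PySem.Dict.mk diz) x with
    | none => diz1                                   -- `if x not in diz: return []`
    | some v =>
      -- `diz1[x] = diz[x]; y = diz1[x]`
      let diz1' := PySem.Dict.insert diz1 x v
      -- `if y != []: for el in y: crea(diz, el, diz1)`   (the fold over [] is the identity)
      v.foldl (fun d el => crea diz fuel el d) diz1'

def elimina (diz : List (String × List String)) (x : String) : List (String × List String) :=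
  match PySem.Dict.get? (PySem.Dict.mk diz) x with
  | none => diz                                      -- `if x not in diz: return diz`
  | some _ =>
    let B := crea diz (diz.length + 1) x PySem.Dict.empty
    -- `{k: v for k, v in diz.items() if k not in B}`
    diz.filter (fun kv => !(PySem.Dict.contains B kv.1))

-- ===== PORT B =====
-- `while stack: n = stack.pop(); …`.  The Lean stack keeps the top at the HEAD of the list
-- (Python's list keeps it at the end), so `stack.extend(diz[n])` is `v.reverse ++ rest`:
-- the traversal pops the same nodes in the same order as Source B.
def eliminaLoop (diz : List (String × List String)) (stack : List String) (reached : PySem.Set String) : PySem.Set String :=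
  match stack with
  | [] => reached
  | n :: rest =>
    if n ∈ reached then eliminaLoop diz rest reached            -- `if n in reached … : continue`
    else
      match hsome : PySem.Dict.get? (PySem.Dict.mk diz) n with
      | none => eliminaLoop diz rest reached                    -- `… or n not in diz: continue`
      | some v =>
        -- `reached.add(n); stack.extend(diz[n])`
        eliminaLoop diz (v.reverse ++ rest) (PySem.Set.add reached n)
  termination_by (((diz.map Prod.fst).toFinset \ reached.toFinset).card, stack.length)
  decreasing_by
  · exact Prod.Lex.right _ (by simp)
  · exact Prod.Lex.right _ (by simp)
  · rename_i hmem
    apply Prod.Lex.left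
    have hn : n ∈ (diz.map Prod.fst).toFinset := by
      have hk : n ∈ (PySem.Dict.mk diz).keys := by
        by_contra hc
        rw [← PySem.Dict.get?_eq_none_iff_not_mem_keys] at hc
        simp [hc] at hsome
      simpa using hk
    have hadd : (PySem.Set.add reached n).toFinset = insert n reached.toFinset := by
      rw [PySem.Set.add_of_not_mem hmem]
      simp [List.toFinset_append]
    rw [hadd]
    apply Finset.card_lt_card
    constructor
    · exact Finset.sdiff_subset_sdiff (Finset.Subset.refl _) (Finset.subset_insert _ _)
    · intro hsub
      have h1 : n ∈ (diz.map Prod.fst).toFinset \ reached.toFinset := by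
        simp [Finset.mem_sdiff, hn, hmem]
      have h2 := hsub h1
      simp [Finset.mem_sdiff] at h2

def elimina_alt (diz : List (String × List String)) (x : String) : List (String × List String) :=
  match PySem.Dict.get? (PySem.Dict.mk diz) x with
  | none => diz                                      -- `if x not in diz: return diz`
  | some _ =>
    let reached := eliminaLoop diz [x] PySem.Set.empty
    -- `{k: v for k, v in diz.items() if k not in reached}`
    diz.filter (fun kv => !(PySem.Set.contains reached kv.1))

-- ===== PRECONDITION & SPEC =====
-- children of k that are themselves keys (only they can be recursed into)
def succsK (diz : List (String × List String)) (k : String) : List String :=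
  ((PySem.Dict.get? (PySem.Dict.mk diz) k).getD []).filter
    (fun c => (PySem.Dict.get? (PySem.Dict.mk diz) c).isSome)
def stepR (diz : List (String × List String)) (S : Finset String) : Finset String :=
  S ∪ S.biUnion (fun k => (succsK diz k).toFinset)
-- `diz.length + 1` iterations saturate the reachable set (at most diz.length distinct keys)
def reachB (diz : List (String × List String)) (S : Finset String) : Finset String :=
  (stepR diz)^[diz.length + 1] S

-- Pre_ excludes exactly the inputs on which Python A never returns (its unbounded recursion hits
-- RecursionError): those where some key reachable from x lies on a directed cycle.
def Pre_elimina (diz : List (String × List String)) (x : String) : Prop :=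
  ∀ k ∈ reachB diz {x}, k ∉ reachB diz (succsK diz k).toFinset
instance (diz : List (String × List String)) (x : String) : Decidable (Pre_elimina diz x) := by
  unfold Pre_elimina; infer_instance

def pvWitness_elimina : (List (String × List String)) × String := ([("a", ["b"]), ("b", [])], "a")

-- On inputs where some key reachable from x lies on a cycle, A's unbounded recursion raises
-- RecursionError; B's visited-set traversal terminates and returns diz filtered by the reachable set.
def Raises_elimina (diz : List (String × List String)) (x : String) : Prop :=
  ∃ k ∈ reachB diz {x}, k ∈ reachB diz (succsK diz k).toFinset
instance (diz : List (String × List String)) (x : String) : Decidable (Raises_elimina diz x) := by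
  unfold Raises_elimina; infer_instance
def pvRaiseWitness_elimina : (List (String × List String)) × String := ([("a", ["a"])], "a")
def pvRaiseWitnessOut_elimina : List (String × List String) := []

def Spec_elimina (diz : List (String × List String)) (x : String) (out : List (String × List String)) : Prop := out = elimina_alt diz x
instance (diz : List (String × List String)) (x : String) (out : List (String × List String)) : Decidable (Spec_elimina diz x out) := by unfold Spec_elimina; infer_instance

-- ===== CLAIM (what is proved, stated in full; the proofs are below) =====
def Claim_equal_elimina : Prop := ∀ (diz : List (String × List String)) (x : String), Dom_elimina diz x → Pre_elimina diz x → Spec_elimina diz x (elimina diz x)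
def Claim_raises_elimina : Prop := (∀ (diz : List (String × List String)) (x : String), Dom_elimina diz x → Raises_elimina diz x → ¬ Pre_elimina diz x) ∧ (Dom_elimina (pvRaiseWitness_elimina.1) (pvRaiseWitness_elimina.2) ∧ Raises_elimina (pvRaiseWitness_elimina.1) (pvRaiseWitness_elimina.2) ∧ elimina_alt (pvRaiseWitness_elimina.1) (pvRaiseWitness_elimina.2) = pvRaiseWitnessOut_elimina)

-- ===== LEMMAS AND PROOFS =====
-- the edge relation of the graph: a is a key and b one of its listed children
def GRel (diz : List (String × List String)) (a b : String) : Prop :=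
  ∃ l, PySem.Dict.get? (PySem.Dict.mk diz) a = some l ∧ b ∈ l

def keyP (diz : List (String × List String)) (k : String) : Prop :=
  (PySem.Dict.get? (PySem.Dict.mk diz) k).isSome = true

-- ---- generic foldl facts about `contains` through a dict-transforming loop ----
theorem foldl_contains_mono (g : PySem.Dict String (List String) → String → PySem.Dict String (List String))
    (k : String) (hmono : ∀ d el, d.contains k = true → (g d el).contains k = true) :
    ∀ (l : List String) (d : PySem.Dict String (List String)),
      d.contains k = true → (l.foldl g d).contains k = true := by
  intro l
  induction l with
  | nil => intro d hd; simpa using hd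
  | cons a tl ih => intro d hd; exact ih (g d a) (hmono d a hd)

theorem foldl_contains_hit (g : PySem.Dict String (List String) → String → PySem.Dict String (List String))
    (k : String) (hmono : ∀ d el, d.contains k = true → (g d el).contains k = true)
    (y : String) (hy : ∀ d, (g d y).contains k = true) :
    ∀ (l : List String) (d : PySem.Dict String (List String)),
      y ∈ l → (l.foldl g d).contains k = true := by
  intro l
  induction l with
  | nil => intro d h; simp at h
  | cons a tl ih =>
    intro d h
    rcases List.mem_cons.mp h with rfl | hm
    · exact foldl_contains_mono g k hmono tl (g d y) (hy d)
    · exact ih (g d a) hm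

theorem foldl_contains_sound (g : PySem.Dict String (List String) → String → PySem.Dict String (List String))
    (k : String) (Q : String → Prop)
    (hstep : ∀ d el, (g d el).contains k = true → d.contains k = true ∨ Q el) :
    ∀ (l : List String) (d : PySem.Dict String (List String)),
      (l.foldl g d).contains k = true → d.contains k = true ∨ ∃ el ∈ l, Q el := by
  intro l
  induction l with
  | nil => intro d h; exact Or.inl (by simpa using h)
  | cons a tl ih =>
    intro d h
    rcases ih (g d a) (by simpa using h) with h1 | ⟨el, hel, hQ⟩
    · rcases hstep d a h1 with h2 | hQ
      · exact Or.inl h2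
      · exact Or.inr ⟨a, List.mem_cons_self, hQ⟩
    · exact Or.inr ⟨el, List.mem_cons_of_mem _ hel, hQ⟩

-- ---- A-side characterisation: crea's dict contains exactly the reachable keys ----
theorem crea_mono (diz : List (String × List String)) (k : String) :
    ∀ (fuel : Nat) (x : String) (d : PySem.Dict String (List String)),
      d.contains k = true → (crea diz fuel x d).contains k = true := by
  intro fuel
  induction fuel with
  | zero => intro x d hd; simpa [crea] using hd
  | succ f ih =>
    intro x d hd
    rw [crea]
    cases h : PySem.Dict.get? (PySem.Dict.mk diz) x with
    | none => simpa using hd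
    | some v =>
      simp only []
      exact foldl_contains_mono _ k (fun d el => ih el d) v _
        (by rw [PySem.Dict.contains_insert]; simp [hd])

theorem crea_sound (diz : List (String × List String)) (k : String) :
    ∀ (fuel : Nat) (x : String) (d : PySem.Dict String (List String)),
      (crea diz fuel x d).contains k = true →
      d.contains k = true ∨ (Relation.ReflTransGen (GRel diz) x k ∧ keyP diz k) := by
  intro fuel
  induction fuel with
  | zero => intro x d h; exact Or.inl (by simpa [crea] using h)
  | succ f ih =>
    intro x d h
    rw [crea] at h
    cases hx : PySem.Dict.get? (PySem.Dict.mk diz) x with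
    | none => rw [hx] at h; exact Or.inl (by simpa using h)
    | some v =>
      rw [hx] at h
      simp only [] at h
      rcases foldl_contains_sound _ k
          (fun el => Relation.ReflTransGen (GRel diz) el k ∧ keyP diz k)
          (fun d el => ih el d) v _ h with h1 | ⟨el, hel, hrt, hk⟩
      · rw [PySem.Dict.contains_insert] at h1
        rcases Bool.or_eq_true_iff.mp h1 with h2 | h2
        · have : k = x := by simpa using h2
          subst this
          exact Or.inr ⟨Relation.ReflTransGen.refl, by simp [keyP, hx]⟩
        · exact Or.inl h2
      · exact Or.inr ⟨Relation.ReflTransGen.head ⟨v, hx, hel⟩ hrt, hk⟩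

theorem crea_complete (diz : List (String × List String)) (k : String) :
    ∀ (l : List String) (x : String) (fuel : Nat) (d : PySem.Dict String (List String)),
      List.IsChain (GRel diz) (x :: l) → (x :: l).getLast? = some k → l.length < fuel →
      keyP diz k → (crea diz fuel x d).contains k = true := by
  intro l
  induction l with
  | nil =>
    intro x fuel d _ hlast hlen hk
    have hkx : k = x := by simpa using hlast.symm
    subst hkx
    obtain ⟨f, rfl⟩ : ∃ f, fuel = f + 1 := ⟨fuel - 1, by omega⟩
    rw [crea]
    cases hx : PySem.Dict.get? (PySem.Dict.mk diz) k with
    | none => simp [keyP, hx] at hk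
    | some v =>
      simp only []
      exact foldl_contains_mono _ k (fun d el hd => crea_mono diz k f el d hd) v _
        (by rw [PySem.Dict.contains_insert]; simp)
  | cons y tl ih =>
    intro x fuel d hchain hlast hlen hk
    obtain ⟨f, rfl⟩ : ∃ f, fuel = f + 1 := ⟨fuel - 1, by omega⟩
    have hrel : GRel diz x y := (List.isChain_cons_cons.mp hchain).1
    have hchain' : List.IsChain (GRel diz) (y :: tl) := (List.isChain_cons_cons.mp hchain).2
    obtain ⟨v, hx, hyv⟩ := hrel
    rw [crea]
    rw [hx]
    simp only []
    exact foldl_contains_hit _ k (fun d el hd => crea_mono diz k f el d hd) y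
      (fun d => ih y f d hchain' (by simpa using hlast) (by simpa using hlen) hk) v _ hyv

-- ---- shortest paths are simple: a chain can be shortened to a Nodup chain ----
theorem not_nodup_split {α : Type} (l : List α) (h : ¬ l.Nodup) :
    ∃ (a : α) (l1 l2 l3 : List α), l = l1 ++ a :: l2 ++ a :: l3 := by
  induction l with
  | nil => simp at h
  | cons x tl ih =>
    by_cases hx : x ∈ tl
    · obtain ⟨s, t, rfl⟩ := List.append_of_mem hx
      exact ⟨x, [], s, t, by simp⟩
    · have htl : ¬ tl.Nodup := by
        simp only [List.nodup_cons] at h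
        tauto
      obtain ⟨a, l1, l2, l3, rfl⟩ := ih htl
      exact ⟨a, x :: l1, l2, l3, by simp⟩

theorem chain_shorten (diz : List (String × List String)) :
    ∀ (p : List String), List.IsChain (GRel diz) p → ¬ p.Nodup →
      ∃ q, List.IsChain (GRel diz) q ∧ q.head? = p.head? ∧ q.getLast? = p.getLast? ∧
        q.length < p.length := by
  intro p hc hnd
  obtain ⟨a, l1, l2, l3, rfl⟩ := not_nodup_split p hnd
  have hc' : List.IsChain (GRel diz) (l1 ++ (a :: (l2 ++ (a :: l3)))) := by simpa using hc
  have h1 := (List.isChain_split (l₁ := l1) (l₂ := l2 ++ (a :: l3))).mp hc'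
  have h2 := (List.isChain_split (l₁ := a :: l2) (l₂ := l3)).mp (by simpa using h1.2)
  refine ⟨l1 ++ (a :: l3), (List.isChain_split (l₁ := l1) (l₂ := l3)).mpr ⟨h1.1, h2.2⟩,
    ?_, ?_, by simp⟩
  · cases l1 <;> simp
  · rw [List.getLast?_append_of_ne_nil _ (by simp : (a :: l3) ≠ []),
      List.getLast?_append_of_ne_nil _ (by simp : (a :: l3) ≠ [])]

theorem chain_to_nodup (diz : List (String × List String)) :
    ∀ (n : Nat) (p : List String), p.length ≤ n → List.IsChain (GRel diz) p →
      ∃ q, List.IsChain (GRel diz) q ∧ q.Nodup ∧ q.head? = p.head? ∧ q.getLast? = p.getLast? ∧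
        q.length ≤ p.length := by
  intro n
  induction n with
  | zero =>
    intro p hlen _
    have : p = [] := List.eq_nil_of_length_eq_zero (by omega)
    subst this
    exact ⟨[], by simp, by simp, rfl, rfl, le_refl _⟩
  | succ n ih =>
    intro p hlen hc
    by_cases hnd : p.Nodup
    · exact ⟨p, hc, hnd, rfl, rfl, le_refl _⟩
    · obtain ⟨q, hq, hh, hl, hlt⟩ := chain_shorten diz p hc hnd
      obtain ⟨q', hq', hnd', hh', hl', hle'⟩ := ih q (by omega) hq
      exact ⟨q', hq', hnd', hh'.trans hh, hl'.trans hl, by omega⟩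

theorem chain_dropLast_key (diz : List (String × List String)) :
    ∀ (p : List String), List.IsChain (GRel diz) p → ∀ a ∈ p.dropLast, keyP diz a := by
  intro p
  induction p with
  | nil => simp
  | cons x tl ih =>
    intro hc a ha
    cases tl with
    | nil => simp at ha
    | cons y t =>
      have h := List.isChain_cons_cons.mp hc
      rw [List.dropLast_cons₂] at ha
      rcases List.mem_cons.mp ha with rfl | ha'
      · obtain ⟨v, hv, _⟩ := h.1
        simp [keyP, hv]
      · exact ih h.2 a ha'

theorem keyP_mem_keys (diz : List (String × List String)) (a : String) (h : keyP diz a) :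
    a ∈ diz.map Prod.fst := by
  have hk : a ∈ (PySem.Dict.mk diz).keys := by
    by_contra hc
    rw [← PySem.Dict.get?_eq_none_iff_not_mem_keys] at hc
    simp [keyP, hc] at h
  simpa using hk

theorem nodup_chain_bound (diz : List (String × List String)) (x : String) (l : List String)
    (hc : List.IsChain (GRel diz) (x :: l)) (hn : (x :: l).Nodup) : l.length ≤ diz.length := by
  have hkeys : ∀ a ∈ (x :: l).dropLast, a ∈ diz.map Prod.fst :=
    fun a ha => keyP_mem_keys diz a (chain_dropLast_key diz _ hc a ha)
  have hnd : (x :: l).dropLast.Nodup := hn.sublist (List.dropLast_sublist _)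
  have h1 : (x :: l).dropLast.toFinset.card = (x :: l).dropLast.length :=
    List.toFinset_card_of_nodup hnd
  have h2 : (x :: l).dropLast.toFinset ⊆ (diz.map Prod.fst).toFinset := by
    intro a ha
    simp only [List.mem_toFinset] at ha ⊢
    exact hkeys a ha
  have h3 := Finset.card_le_card h2
  have h4 := List.toFinset_card_le (diz.map Prod.fst)
  have h5 : (x :: l).dropLast.length = l.length := by simp
  simp only [List.length_map] at h4
  omega

theorem crea_contains_iff (diz : List (String × List String)) (x : String)
    (hx : keyP diz x) (k : String) :
    (crea diz (diz.length + 1) x PySem.Dict.empty).contains k = true ↔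
      Relation.ReflTransGen (GRel diz) x k ∧ keyP diz k := by
  constructor
  · intro h
    rcases crea_sound diz k (diz.length + 1) x PySem.Dict.empty h with h1 | h2
    · simp [PySem.Dict.contains_empty] at h1
    · exact h2
  · rintro ⟨hrt, hk⟩
    obtain ⟨l, hch, hlast⟩ := List.exists_isChain_cons_of_relationReflTransGen hrt
    have hlast? : (x :: l).getLast? = some k := by
      rw [List.getLast?_eq_some_getLast (by simp : (x :: l) ≠ [])]
      exact congrArg some hlast
    obtain ⟨q, hq, hnd, hh, hl, _⟩ :=
      chain_to_nodup diz (x :: l).length (x :: l) (le_refl _) hch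
    cases q with
    | nil => simp at hh
    | cons b t =>
      have hb : b = x := by simpa using hh
      subst hb
      exact crea_complete diz k t b (diz.length + 1) PySem.Dict.empty hq (hl.trans hlast?)
        (by have := nodup_chain_bound diz b t hq hnd; omega) hk

-- ---- B-side characterisation: the loop's final set is exactly the reachable keys ----
theorem loop_nil (diz : List (String × List String)) (reached : PySem.Set String) :
    eliminaLoop diz [] reached = reached := by
  rw [eliminaLoop]

theorem loop_visited (diz : List (String × List String)) (n : String) (rest : List String)
    (reached : PySem.Set String) (h : n ∈ reached) :
    eliminaLoop diz (n :: rest) reached = eliminaLoop diz rest reached := by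
  rw [eliminaLoop, if_pos h]

theorem loop_nokey (diz : List (String × List String)) (n : String) (rest : List String)
    (reached : PySem.Set String) (h : n ∉ reached)
    (h2 : PySem.Dict.get? (PySem.Dict.mk diz) n = none) :
    eliminaLoop diz (n :: rest) reached = eliminaLoop diz rest reached := by
  rw [eliminaLoop, if_neg h]
  split
  · rfl
  · rename_i v heq
    simp [h2] at heq

theorem loop_key (diz : List (String × List String)) (n : String) (rest : List String)
    (reached : PySem.Set String) (v : List String) (h : n ∉ reached)
    (h2 : PySem.Dict.get? (PySem.Dict.mk diz) n = some v) :
    eliminaLoop diz (n :: rest) reached =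
      eliminaLoop diz (v.reverse ++ rest) (PySem.Set.add reached n) := by
  rw [eliminaLoop, if_neg h]
  split
  · rename_i heq
    simp [h2] at heq
  · rename_i v' heq
    rw [h2] at heq
    injection heq with h3
    subst h3
    rfl

theorem loop_sound (diz : List (String × List String)) (x : String) :
    ∀ (stack : List String) (reached : PySem.Set String),
      (∀ s ∈ stack, Relation.ReflTransGen (GRel diz) x s) →
      (∀ r ∈ reached, Relation.ReflTransGen (GRel diz) x r ∧ keyP diz r) →
      ∀ k ∈ eliminaLoop diz stack reached, Relation.ReflTransGen (GRel diz) x k ∧ keyP diz k := by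
  intro stack reached
  induction stack, reached using eliminaLoop.induct diz with
  | case1 reached =>
    intro _ hreach k hk
    rw [loop_nil] at hk
    exact hreach k hk
  | case2 reached n rest hn ih =>
    intro hstack hreach k hk
    rw [loop_visited diz n rest reached hn] at hk
    exact ih (fun s hs => hstack s (List.mem_cons_of_mem _ hs)) hreach k hk
  | case3 reached n rest hn hv ih =>
    intro hstack hreach k hk
    rw [loop_nokey diz n rest reached hn hv] at hk
    exact ih (fun s hs => hstack s (List.mem_cons_of_mem _ hs)) hreach k hk
  | case4 reached n rest hn v hv ih =>
    intro hstack hreach k hk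
    rw [loop_key diz n rest reached v hn hv] at hk
    refine ih ?_ ?_ k hk
    · intro s hs
      rcases List.mem_append.mp hs with hs | hs
      · exact Relation.ReflTransGen.tail (hstack n List.mem_cons_self)
          ⟨v, hv, List.mem_reverse.mp hs⟩
      · exact hstack s (List.mem_cons_of_mem _ hs)
    · intro r hr
      rcases (PySem.Set.mem_add _ _ _).mp hr with hr | rfl
      · exact hreach r hr
      · exact ⟨hstack r List.mem_cons_self, by simp [keyP, hv]⟩

theorem loop_spec (diz : List (String × List String)) :
    ∀ (stack : List String) (reached : PySem.Set String),
      (∀ r ∈ reached, ∀ c, GRel diz r c → keyP diz c → c ∈ reached ∨ c ∈ stack) →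
      (∀ r ∈ reached, r ∈ eliminaLoop diz stack reached) ∧
      (∀ s ∈ stack, keyP diz s → s ∈ eliminaLoop diz stack reached) ∧
      (∀ r ∈ eliminaLoop diz stack reached, ∀ c, GRel diz r c → keyP diz c →
        c ∈ eliminaLoop diz stack reached) := by
  intro stack reached
  induction stack, reached using eliminaLoop.induct diz with
  | case1 reached =>
    intro hcl
    rw [loop_nil]
    refine ⟨fun r hr => hr, by simp, ?_⟩
    intro r hr c hrel hc
    rcases hcl r hr c hrel hc with h | h
    · exact h
    · simp at h
  | case2 reached n rest hn ih =>
    intro hcl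
    rw [loop_visited diz n rest reached hn]
    have hcl' : ∀ r ∈ reached, ∀ c, GRel diz r c → keyP diz c → c ∈ reached ∨ c ∈ rest := by
      intro r hr c hrel hc
      rcases hcl r hr c hrel hc with h | h
      · exact Or.inl h
      · rcases List.mem_cons.mp h with rfl | h
        · exact Or.inl hn
        · exact Or.inr h
    obtain ⟨ih1, ih2, ih3⟩ := ih hcl'
    refine ⟨ih1, ?_, ih3⟩
    intro s hs hks
    rcases List.mem_cons.mp hs with rfl | hs
    · exact ih1 s hn
    · exact ih2 s hs hks
  | case3 reached n rest hn hv ih =>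
    intro hcl
    rw [loop_nokey diz n rest reached hn hv]
    have hcl' : ∀ r ∈ reached, ∀ c, GRel diz r c → keyP diz c → c ∈ reached ∨ c ∈ rest := by
      intro r hr c hrel hc
      rcases hcl r hr c hrel hc with h | h
      · exact Or.inl h
      · rcases List.mem_cons.mp h with rfl | h
        · simp [keyP, hv] at hc
        · exact Or.inr h
    obtain ⟨ih1, ih2, ih3⟩ := ih hcl'
    refine ⟨ih1, ?_, ih3⟩
    intro s hs hks
    rcases List.mem_cons.mp hs with rfl | hs
    · simp [keyP, hv] at hks
    · exact ih2 s hs hks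
  | case4 reached n rest hn v hv ih =>
    intro hcl
    rw [loop_key diz n rest reached v hn hv]
    have hcl' : ∀ r ∈ PySem.Set.add reached n, ∀ c, GRel diz r c → keyP diz c →
        c ∈ PySem.Set.add reached n ∨ c ∈ v.reverse ++ rest := by
      intro r hr c hrel hc
      rcases (PySem.Set.mem_add _ _ _).mp hr with hr | rfl
      · rcases hcl r hr c hrel hc with h | h
        · exact Or.inl ((PySem.Set.mem_add _ _ _).mpr (Or.inl h))
        · rcases List.mem_cons.mp h with rfl | h
          · exact Or.inl ((PySem.Set.mem_add _ _ _).mpr (Or.inr rfl))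
          · exact Or.inr (List.mem_append.mpr (Or.inr h))
      · obtain ⟨l, hl, hcl2⟩ := hrel
        rw [hv] at hl
        cases hl
        exact Or.inr (List.mem_append.mpr (Or.inl (List.mem_reverse.mpr hcl2)))
    obtain ⟨ih1, ih2, ih3⟩ := ih hcl'
    refine ⟨?_, ?_, ih3⟩
    · intro r hr
      exact ih1 r ((PySem.Set.mem_add _ _ _).mpr (Or.inl hr))
    · intro s hs hks
      rcases List.mem_cons.mp hs with rfl | hs
      · exact ih1 s ((PySem.Set.mem_add _ _ _).mpr (Or.inr rfl))
      · exact ih2 s (List.mem_append.mpr (Or.inr hs)) hks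

theorem loop_mem_iff (diz : List (String × List String)) (x : String)
    (hx : keyP diz x) (k : String) :
    k ∈ eliminaLoop diz [x] PySem.Set.empty ↔
      Relation.ReflTransGen (GRel diz) x k ∧ keyP diz k := by
  constructor
  · intro hk
    refine loop_sound diz x [x] PySem.Set.empty ?_ ?_ k hk
    · intro s hs
      rcases List.mem_cons.mp hs with rfl | h
      · exact .refl
      · simp at h
    · intro r hr
      simp [PySem.Set.empty] at hr
  · rintro ⟨hrt, hk⟩
    obtain ⟨h1, h2, h3⟩ := loop_spec diz [x] PySem.Set.empty
      (by intro r hr; simp [PySem.Set.empty] at hr)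
    have hxS : x ∈ eliminaLoop diz [x] PySem.Set.empty := h2 x List.mem_cons_self hx
    clear h1 h2
    induction hrt with
    | refl => exact hxS
    | tail hab hbc ih =>
      rename_i b c
      have hkb : keyP diz b := by
        obtain ⟨l, hl, _⟩ := hbc
        simp [keyP, hl]
      exact h3 b (ih hkb) c hbc hk

theorem elimina_eq_alt (diz : List (String × List String)) (x : String) :
    elimina diz x = elimina_alt diz x := by
  unfold elimina elimina_alt
  cases h : PySem.Dict.get? (PySem.Dict.mk diz) x with
  | none => rfl
  | some v =>
    have hx : keyP diz x := by simp [keyP, h]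
    simp only []
    apply List.filter_congr
    intro kv _
    have hiff : ((crea diz (diz.length + 1) x PySem.Dict.empty).contains kv.1 = true) ↔
        (PySem.Set.contains (eliminaLoop diz [x] PySem.Set.empty) kv.1 = true) := by
      rw [crea_contains_iff diz x hx kv.1, PySem.Set.contains_iff,
        loop_mem_iff diz x hx kv.1]
    have hbool : (crea diz (diz.length + 1) x PySem.Dict.empty).contains kv.1 =
        PySem.Set.contains (eliminaLoop diz [x] PySem.Set.empty) kv.1 := by
      rw [Bool.eq_iff_iff]
      exact hiff
    rw [hbool]

theorem raise_witness_loop :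
    eliminaLoop [("a", ["a"])] ["a"] PySem.Set.empty = ["a"] := by
  rw [loop_key _ _ _ _ ["a"] (by simp [PySem.Set.empty]) (by decide)]
  have h1 : (["a"] : List String).reverse ++ ([] : List String) = ["a"] := by decide
  have h2 : PySem.Set.add PySem.Set.empty "a" = ["a"] := by decide
  rw [h1, h2, loop_visited _ _ _ _ (by decide), loop_nil]

theorem raise_witness_alt : elimina_alt [("a", ["a"])] "a" = [] := by
  unfold elimina_alt
  rw [show PySem.Dict.get? (PySem.Dict.mk [("a", ["a"])]) "a" = some ["a"] from by decide]
  simp only [raise_witness_loop]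
  decide

-- ===== VERDICT (by name: the statement is the Claim_ definition above) =====
theorem elimina_spec : Claim_equal_elimina := by
  intro diz x _ _
  unfold Spec_elimina
  exact elimina_eq_alt diz x

theorem elimina_raises : Claim_raises_elimina := by
  unfold Claim_raises_elimina
  refine ⟨?_, by decide, by decide, raise_witness_alt⟩
  rintro diz x _ ⟨k, hk, hc⟩ hpre
  exact hpre k hk hc

-- self-check: the stated raise witness really lies inside Raises_elimina
theorem pvRaiseWitness_ok :
    Raises_elimina pvRaiseWitness_elimina.1 pvRaiseWitness_elimina.2 :=
  elimina_raises.2.2.1
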